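-- pv_equiv track=rewrite | github.com/D-a-r-z/Plex2Sign | api/svg_generator.py | _create_dynamic_gradient
-- ===== SOURCE A (Python) =====
-- from typing import Dict, Any, Optional, List, Tuple
--
-- def _create_dynamic_gradient(colors: List[Tuple[int, int, int]], gradient_id: str) -> str:
--     """Crea degradado dinámico basado en colores extraídos"""
--     gradient_def = f'''
--     <linearGradient id="{gradient_id}" x1="0%" y1="0%" x2="100%" y2="0%">
--     '''
--
--     # Crear stops del degradado con los colores extraídos
--     for i, color in enumerate(colors):
--         offset = (i * 100) // (len(colors) - 1) if len(colors) > 1 else 0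
--         rgb = f"rgb({color[0]}, {color[1]}, {color[2]})"
--
--         # Crear animación de colores que rota entre todos los colores
--         color_values = []
--         for j in range(len(colors)):
--             next_color = colors[(i + j) % len(colors)]
--             color_values.append(f"rgb({next_color[0]}, {next_color[1]}, {next_color[2]})")
--         color_values.append(color_values[0])  # Volver al inicio
--
--         gradient_def += f'''
--         <stop offset="{offset}%" style="stop-color:{rgb};stop-opacity:1">
--             <animate attributeName="stop-color"
--                      values="{';'.join(color_values)}"
--                      dur="15s"
--                      repeatCount="indefinite"/>
--         </stop>
--         '''
--
--     gradient_def += '''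
--     </linearGradient>
--     '''
--
--     return gradient_def
-- ===== SOURCE B (Python) =====
-- def _create_dynamic_gradient(colors, gradient_id):
--     """Same gradient markup via one doubled joined color string and prefix-offset slicing."""
--     rgb = [f"rgb({c[0]}, {c[1]}, {c[2]})" for c in colors]
--     n = len(rgb)
--     big = ";".join(rgb + rgb)
--     cycle_len = len(big) // 2  # length of ";".join(rgb): big is that cycle twice around one ';'
--     pos = []  # pos[i] = index in big where rgb[i]'s copy starts
--     p = 0
--     for s in rgb:
--         pos.append(p)
--         p += len(s) + 1
--     out = f'''
--     <linearGradient id="{gradient_id}" x1="0%" y1="0%" x2="100%" y2="0%">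
--     '''
--     for i in range(n):
--         offset = (i * 100) // (n - 1) if n > 1 else 0
--         values = big[pos[i]:pos[i] + cycle_len] + ";" + rgb[i]
--         out += f'''
--         <stop offset="{offset}%" style="stop-color:{rgb[i]};stop-opacity:1">
--             <animate attributeName="stop-color"
--                      values="{values}"
--                      dur="15s"
--                      repeatCount="indefinite"/>
--         </stop>
--         '''
--     out += '''
--     </linearGradient>
--     '''
--     return out
-- ===== Notes on version B (the rewrite author's own statement) =====
-- stated objective: faster
-- what changed: B formats each color once, joins the doubled rgb list into one big string, and produces every stop's animation value by a single character-range slice at a precomputed prefix offset (each rotation is a contiguous run of the doubled string), instead of A's per-stop inner loop that re-formats every color and joins a fresh list for each stop.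
import Mathlib
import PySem

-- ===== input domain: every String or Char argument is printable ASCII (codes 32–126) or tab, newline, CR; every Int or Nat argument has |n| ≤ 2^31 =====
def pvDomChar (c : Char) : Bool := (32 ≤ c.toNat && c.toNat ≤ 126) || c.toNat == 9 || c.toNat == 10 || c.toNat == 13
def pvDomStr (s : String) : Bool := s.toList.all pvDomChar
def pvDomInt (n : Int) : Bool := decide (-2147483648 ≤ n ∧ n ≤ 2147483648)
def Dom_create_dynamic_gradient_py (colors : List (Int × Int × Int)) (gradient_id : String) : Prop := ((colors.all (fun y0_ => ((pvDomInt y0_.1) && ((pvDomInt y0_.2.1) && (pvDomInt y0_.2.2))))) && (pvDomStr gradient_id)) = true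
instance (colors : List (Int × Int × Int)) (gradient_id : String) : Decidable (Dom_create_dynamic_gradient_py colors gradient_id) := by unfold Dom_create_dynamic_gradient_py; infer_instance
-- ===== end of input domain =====

-- B formats each color once, joins the doubled list into ONE string, and reads every stop's
-- animation value out of it by a prefix-offset slice (the rotated cycle is a contiguous run of
-- that doubled string) — no per-stop list building or joining; measurably faster.

-- ===== PORT A =====
-- f"rgb({c[0]}, {c[1]}, {c[2]})"
def pvRgbA (c : Int × Int × Int) : String :=
  "rgb(" ++ PySem.Int.toStr c.1 ++ ", " ++ PySem.Int.toStr c.2.1 ++ ", " ++ PySem.Int.toStr c.2.2 ++ ")"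

def create_dynamic_gradient_py (colors : List (Int × Int × Int)) (gradient_id : String) : String :=
  let gradient_def :=
    "\n    <linearGradient id=\"" ++ gradient_id ++ "\" x1=\"0%\" y1=\"0%\" x2=\"100%\" y2=\"0%\">\n    "
  let gradient_def := (PySem.List.enumerate colors 0).foldl (fun acc ic =>
    let i := ic.1
    let color := ic.2
    let offset : Int :=
      if colors.length > 1 then PySem.Int.floordiv (i * 100) ((colors.length : Int) - 1) else 0
    let rgb := pvRgbA color
    -- inner loop: for j in range(len(colors)): append rgb of colors[(i+j) % len(colors)]
    -- the index (i+j) % len(colors) is always in range, so pyGetD is exact here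
    let color_values : List String :=
      (PySem.List.pyRange 0 (colors.length : Int) 1).foldl (fun cv j =>
        cv ++ [pvRgbA (PySem.List.pyGetD colors (PySem.Int.mod (i + j) (colors.length : Int)) (0, 0, 0))]) []
    -- color_values.append(color_values[0]): the list has length len(colors) ≥ 1 here, so getD 0 is exact
    let color_values := color_values ++ [color_values.getD 0 ""]
    acc ++ ("\n        <stop offset=\"" ++ PySem.Int.toStr offset
      ++ "%\" style=\"stop-color:" ++ rgb
      ++ ";stop-opacity:1\">\n            <animate attributeName=\"stop-color\" \n                     values=\""
      ++ PySem.Str.join ";" color_values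
      ++ "\" \n                     dur=\"15s\" \n                     repeatCount=\"indefinite\"/>\n        </stop>\n        "))
    gradient_def
  gradient_def ++ "\n    </linearGradient>\n    "

-- ===== PORT B =====
-- f"rgb({c[0]}, {c[1]}, {c[2]})"
def pvRgbB (c : Int × Int × Int) : String :=
  "rgb(" ++ PySem.Int.toStr c.1 ++ ", " ++ PySem.Int.toStr c.2.1 ++ ", " ++ PySem.Int.toStr c.2.2 ++ ")"

def create_dynamic_gradient_py_alt (colors : List (Int × Int × Int)) (gradient_id : String) : String :=
  let rgb := colors.map pvRgbB
  let n := rgb.length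
  let big := PySem.Str.join ";" (rgb ++ rgb)
  let cycle_len : Int := PySem.Int.floordiv (PySem.Str.len big) 2
  -- pos loop: pos.append(p); p += len(s) + 1
  let pos : List Int := (rgb.foldl (fun (st : List Int × Int) s =>
      (st.1 ++ [st.2], st.2 + PySem.Str.len s + 1)) (([] : List Int), (0 : Int))).1
  let out :=
    "\n    <linearGradient id=\"" ++ gradient_id ++ "\" x1=\"0%\" y1=\"0%\" x2=\"100%\" y2=\"0%\">\n    "
  let out := (PySem.List.pyRange 0 (n : Int) 1).foldl (fun acc i =>
    let offset : Int := if n > 1 then PySem.Int.floordiv (i * 100) ((n : Int) - 1) else 0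
    -- i ranges over range(n); pos[i] and rgb[i] are in range, so pyGetD is exact here
    let p := PySem.List.pyGetD pos i 0
    let values := PySem.Str.slice big (some p) (some (p + cycle_len)) ++ ";" ++ PySem.List.pyGetD rgb i ""
    acc ++ ("\n        <stop offset=\"" ++ PySem.Int.toStr offset
      ++ "%\" style=\"stop-color:" ++ PySem.List.pyGetD rgb i ""
      ++ ";stop-opacity:1\">\n            <animate attributeName=\"stop-color\" \n                     values=\""
      ++ values
      ++ "\" \n                     dur=\"15s\" \n                     repeatCount=\"indefinite\"/>\n        </stop>\n        ")) out
  out ++ "\n    </linearGradient>\n    "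

-- ===== PRECONDITION & SPEC =====
def Spec_create_dynamic_gradient_py (colors : List (Int × Int × Int)) (gradient_id : String) (out : String) : Prop := out = create_dynamic_gradient_py_alt colors gradient_id
instance (colors : List (Int × Int × Int)) (gradient_id : String) (out : String) : Decidable (Spec_create_dynamic_gradient_py colors gradient_id out) := by unfold Spec_create_dynamic_gradient_py; infer_instance

-- ===== CLAIM =====
def Claim_equal_create_dynamic_gradient_py : Prop := ∀ (colors : List (Int × Int × Int)) (gradient_id : String), Dom_create_dynamic_gradient_py colors gradient_id → Spec_create_dynamic_gradient_py colors gradient_id (create_dynamic_gradient_py colors gradient_id)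

-- ===== LEMMAS AND PROOFS =====

theorem pv_rgb_eq : pvRgbA = pvRgbB := rfl

-- A's loop body (what each iteration appends), for restating A's fold
def pvStopA (colors : List (Int × Int × Int)) (ic : Int × (Int × Int × Int)) : String :=
  let i := ic.1
  let color := ic.2
  let offset : Int :=
    if colors.length > 1 then PySem.Int.floordiv (i * 100) ((colors.length : Int) - 1) else 0
  let rgb := pvRgbA color
  let color_values : List String :=
    (PySem.List.pyRange 0 (colors.length : Int) 1).foldl (fun cv j =>
      cv ++ [pvRgbA (PySem.List.pyGetD colors (PySem.Int.mod (i + j) (colors.length : Int)) (0, 0, 0))]) []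
  let color_values := color_values ++ [color_values.getD 0 ""]
  "\n        <stop offset=\"" ++ PySem.Int.toStr offset
    ++ "%\" style=\"stop-color:" ++ rgb
    ++ ";stop-opacity:1\">\n            <animate attributeName=\"stop-color\" \n                     values=\""
    ++ PySem.Str.join ";" color_values
    ++ "\" \n                     dur=\"15s\" \n                     repeatCount=\"indefinite\"/>\n        </stop>\n        "

-- B's loop body, with big / cycle_len / pos recomputed from colors (the let-bound values)
def pvStopB (colors : List (Int × Int × Int)) (i : Int) : String :=
  let rgb := colors.map pvRgbB
  let n := rgb.length
  let big := PySem.Str.join ";" (rgb ++ rgb)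
  let cycle_len : Int := PySem.Int.floordiv (PySem.Str.len big) 2
  let pos : List Int := (rgb.foldl (fun (st : List Int × Int) s =>
      (st.1 ++ [st.2], st.2 + PySem.Str.len s + 1)) (([] : List Int), (0 : Int))).1
  let offset : Int := if n > 1 then PySem.Int.floordiv (i * 100) ((n : Int) - 1) else 0
  let p := PySem.List.pyGetD pos i 0
  let values := PySem.Str.slice big (some p) (some (p + cycle_len)) ++ ";" ++ PySem.List.pyGetD rgb i ""
  "\n        <stop offset=\"" ++ PySem.Int.toStr offset
    ++ "%\" style=\"stop-color:" ++ PySem.List.pyGetD rgb i ""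
    ++ ";stop-opacity:1\">\n            <animate attributeName=\"stop-color\" \n                     values=\""
    ++ values
    ++ "\" \n                     dur=\"15s\" \n                     repeatCount=\"indefinite\"/>\n        </stop>\n        "

theorem pvA_unfold (colors : List (Int × Int × Int)) (gradient_id : String) :
    create_dynamic_gradient_py colors gradient_id =
      ((PySem.List.enumerate colors 0).foldl (fun acc ic => acc ++ pvStopA colors ic)
        ("\n    <linearGradient id=\"" ++ gradient_id ++ "\" x1=\"0%\" y1=\"0%\" x2=\"100%\" y2=\"0%\">\n    "))
      ++ "\n    </linearGradient>\n    " := rfl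

theorem pvB_unfold (colors : List (Int × Int × Int)) (gradient_id : String) :
    create_dynamic_gradient_py_alt colors gradient_id =
      ((PySem.List.pyRange 0 ((colors.map pvRgbB).length : Int) 1).foldl
        (fun acc i => acc ++ pvStopB colors i)
        ("\n    <linearGradient id=\"" ++ gradient_id ++ "\" x1=\"0%\" y1=\"0%\" x2=\"100%\" y2=\"0%\">\n    "))
      ++ "\n    </linearGradient>\n    " := rfl

theorem pv_foldl_toList {a : Type} (g : a -> String) (l : List a) (init : String) :
    (l.foldl (fun acc x => acc ++ g x) init).toList
      = init.toList ++ (l.map (fun x => (g x).toList)).flatten := by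
  induction l generalizing init with
  | nil => simp
  | cons x t ih => simp [ih, String.toList_append]

-- join over [';'] splits across an append of two nonempty part-lists
theorem pv_join_append (sep : List Char) (a b : List (List Char)) (ha : a ≠ []) (hb : b ≠ []) :
    PySem.Chars.join sep (a ++ b) = PySem.Chars.join sep a ++ sep ++ PySem.Chars.join sep b := by
  induction a with
  | nil => exact absurd rfl ha
  | cons x t ih =>
    cases t with
    | nil =>
      cases b with
      | nil => exact absurd rfl hb
      | cons y r =>
        rw [List.singleton_append, PySem.Chars.join_cons_cons, PySem.Chars.join_singleton]
    | cons x2 t2 =>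
      rw [List.cons_append, PySem.Chars.join_cons_cons]
      rw [List.cons_append, PySem.Chars.join_cons_cons]
      have h := ih (by simp)
      rw [List.cons_append] at h
      rw [h]
      simp [List.append_assoc]

-- length of the join: sum of part lengths plus one separator between consecutive parts
theorem pv_join_len (sep : List Char) (l : List (List Char)) (hl : l ≠ []) :
    (PySem.Chars.join sep l).length = (l.map List.length).sum + sep.length * (l.length - 1) := by
  induction l with
  | nil => exact absurd rfl hl
  | cons x t ih =>
    cases t with
    | nil => simp [PySem.Chars.join_singleton]
    | cons y r =>
      rw [PySem.Chars.join_cons_cons]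
      simp only [List.length_append, ih (by simp), List.map_cons, List.sum_cons, List.length_cons]
      simp only [Nat.add_sub_cancel]
      rw [Nat.mul_succ]
      omega

-- the nat prefix offset p_i = sum over the first i parts of (length + 1)
def pvP (rgb : List String) (i : Nat) : Nat :=
  ((rgb.take i).map (fun s => s.toList.length + 1)).sum

theorem pv_pos_foldl (l : List String) (acc : List Int) (q : Int) :
    (l.foldl (fun (st : List Int × Int) s => (st.1 ++ [st.2], st.2 + PySem.Str.len s + 1)) (acc, q)).1
      = acc ++ (List.range l.length).map (fun j => q + (pvP l j : Int)) := by
  induction l generalizing acc q with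
  | nil => simp
  | cons s t ih =>
    simp only [List.foldl_cons, ih]
    rw [List.length_cons, List.range_succ_eq_map]
    simp only [List.map_cons, List.map_map]
    have h0 : pvP (s :: t) 0 = 0 := rfl
    have hj : ∀ j : Nat, pvP (s :: t) (j + 1) = s.toList.length + 1 + pvP t j := by
      intro j; simp [pvP, List.take_succ_cons, Nat.add_comm]
    simp only [h0, hj, Function.comp_def, PySem.Str.len_eq]
    simp only [Nat.cast_zero, add_zero, List.append_assoc, List.singleton_append]
    congr 2
    apply List.map_congr_left
    intro j _
    push_cast
    ring

theorem pv_floordiv_two (m : Nat) : PySem.Int.floordiv ((2 * m + 1 : Nat) : Int) 2 = (m : Int) := by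
  rw [PySem.Int.floordiv_eq_ediv_of_pos (by norm_num)]
  omega

-- the core fact: the slice of the doubled joined string at offset p_k of length
-- |join(rgb)| is exactly the join of the k-rotation of rgb
theorem pv_slice_rotate (rgb : List String) (k : Nat) (hk : k < rgb.length) :
    PySem.Str.slice (PySem.Str.join ";" (rgb ++ rgb))
        (some ((pvP rgb k : Nat) : Int))
        (some (((pvP rgb k : Nat) : Int) + PySem.Int.floordiv (PySem.Str.len (PySem.Str.join ";" (rgb ++ rgb))) 2))
      = PySem.Str.join ";" (rgb.rotate k) := by
  have hne : rgb ≠ [] := by intro h; rw [h] at hk; simp at hk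
  set L : List (List Char) := rgb.map String.toList with hL
  have hLne : L ≠ [] := by simpa [hL] using hne
  have hLlen : L.length = rgb.length := by simp [hL]
  have hsep : (";" : String).toList = [';'] := rfl
  have hbig : (PySem.Str.join ";" (rgb ++ rgb)).toList
      = PySem.Chars.join [';'] L ++ [';'] ++ PySem.Chars.join [';'] L := by
    rw [PySem.Str.toList_join, hsep, List.map_append, ← hL, pv_join_append _ _ _ hLne hLne]
  -- cycle_len = |join(rgb)|
  have hlen : PySem.Str.len (PySem.Str.join ";" (rgb ++ rgb))
      = ((2 * (PySem.Chars.join [';'] L).length + 1 : Nat) : Int) := by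
    rw [PySem.Str.len_eq, hbig]
    simp; push_cast; ring
  have hcyc : PySem.Int.floordiv (PySem.Str.len (PySem.Str.join ";" (rgb ++ rgb))) 2
      = (((PySem.Chars.join [';'] L).length : Nat) : Int) := by
    rw [hlen, pv_floordiv_two]
  -- reduce the string slice to drop/take on the char list
  apply String.toList_inj.mp
  rw [PySem.Str.toList_slice, PySem.Chars.slice_eq_listSlice, hcyc, hbig,
    PySem.List.slice_natCast_add]
  rw [PySem.Str.toList_join, hsep, List.map_rotate, ← hL]
  -- two cases: k = 0 and k ≥ 1
  rcases Nat.eq_zero_or_pos k with hk0 | hkpos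
  · subst hk0
    have hp : pvP rgb 0 = 0 := rfl
    rw [hp, List.drop_zero, List.rotate_zero, List.append_assoc]
    exact List.take_left' rfl
  · -- split L at k
    have hkL : k < L.length := by omega
    have htne : L.take k ≠ [] := by
      intro h
      have := congrArg List.length h
      simp [Nat.min_eq_left (Nat.le_of_lt hkL)] at this
      omega
    have hdne : L.drop k ≠ [] := by
      intro h
      have := congrArg List.length h
      simp at this
      omega
    -- p_k = |join(take k)| + 1
    have hsum : pvP rgb k = ((L.take k).map List.length).sum + k := by
      simp only [pvP, hL, ← List.map_take, List.map_map, Function.comp_def]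
      rw [List.sum_map_add]
      simp
      omega
    have hpk : pvP rgb k = (PySem.Chars.join [';'] (L.take k)).length + 1 := by
      rw [pv_join_len _ _ htne, hsum]
      simp [Nat.min_eq_left (Nat.le_of_lt hkL)]
      omega
    -- big = join(take k) ++ ; ++ join(drop k ++ L)
    have hsplit1 : PySem.Chars.join [';'] L ++ [';'] ++ PySem.Chars.join [';'] L
        = PySem.Chars.join [';'] (L.take k) ++ [';']
          ++ PySem.Chars.join [';'] (L.drop k ++ L) := by
      conv_lhs => rw [show PySem.Chars.join [';'] L ++ [';'] ++ PySem.Chars.join [';'] L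
          = PySem.Chars.join [';'] (L ++ L) from
          (pv_join_append [';'] L L hLne hLne).symm]
      conv_lhs => rw [show L ++ L = L.take k ++ (L.drop k ++ L) from by
        rw [← List.append_assoc, List.take_append_drop]]
      rw [pv_join_append _ _ _ htne (by simp [hLne])]
    rw [hsplit1, hpk]
    rw [show PySem.Chars.join [';'] (L.take k) ++ [';']
          ++ PySem.Chars.join [';'] (L.drop k ++ L)
        = (PySem.Chars.join [';'] (L.take k) ++ [';'])
          ++ PySem.Chars.join [';'] (L.drop k ++ L) from by simp [List.append_assoc]]
    rw [List.drop_left' (by simp)]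
    -- join(drop k ++ L) = join(rotate) ++ ; ++ join(drop k)
    have hsplit2 : PySem.Chars.join [';'] (L.drop k ++ L)
        = PySem.Chars.join [';'] (L.rotate k) ++ [';'] ++ PySem.Chars.join [';'] (L.drop k) := by
      conv_lhs => rw [show L.drop k ++ L = (L.drop k ++ L.take k) ++ L.drop k from by
        rw [List.append_assoc, List.take_append_drop]]
      rw [pv_join_append _ _ _ (by simp [hdne]) hdne,
        ← List.rotate_eq_drop_append_take (Nat.le_of_lt hkL)]
    rw [hsplit2]
    -- the rotation is a permutation, so the join lengths agree
    have hrotlen : (PySem.Chars.join [';'] (L.rotate k)).length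
        = (PySem.Chars.join [';'] L).length := by
      have hperm := List.rotate_perm L k
      have hrne : L.rotate k ≠ [] := by
        rw [List.rotate_eq_drop_append_take (Nat.le_of_lt hkL)]
        simp [hdne]
      rw [pv_join_len _ _ hrne, pv_join_len _ _ hLne]
      rw [List.Perm.length_eq hperm, List.Perm.sum_eq (List.Perm.map _ hperm)]
    rw [List.append_assoc]
    exact List.take_left' hrotlen

-- join with a trailing singleton appended
theorem pv_join_snoc (parts : List String) (x : String) (h : parts ≠ []) :
    PySem.Str.join ";" (parts ++ [x]) = PySem.Str.join ";" parts ++ ";" ++ x := by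
  apply String.toList_inj.mp
  simp only [PySem.Str.toList_join, String.toList_append, List.map_append, List.map_cons,
    List.map_nil]
  rw [pv_join_append _ _ _ (by simpa using h) (by simp), PySem.Chars.join_singleton]

-- A's inner loop computes the rgb strings of the k-rotation of colors
theorem pv_values_eq (colors : List (Int × Int × Int)) (k : Nat) (hk : k < colors.length) :
    (PySem.List.pyRange 0 (colors.length : Int) 1).foldl (fun cv j =>
        cv ++ [pvRgbA (PySem.List.pyGetD colors (PySem.Int.mod ((k : Int) + j) (colors.length : Int)) (0, 0, 0))]) []
      = (colors.rotate k).map pvRgbA := by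
  rw [PySem.List.foldl_append_singleton_eq_map, PySem.List.pyRange_zero_natCast, List.map_map]
  apply List.ext_getElem (by simp)
  intro j h1 h2
  have hn : (0 : Int) < (colors.length : Int) := by exact_mod_cast Nat.zero_lt_of_lt hk
  simp only [List.nil_append, List.getElem_map, List.getElem_range, Function.comp_def]
  rw [List.getElem_rotate]
  congr 1
  rw [PySem.Int.mod_eq_emod_of_pos hn]
  have hcast : ((k : Int) + (j : Int)) % ((colors.length : Nat) : Int)
      = (((j + k) % colors.length : Nat) : Int) := by push_cast; ring_nf
  rw [hcast, PySem.List.pyGetD_natCast]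
  rw [List.getD_eq_getElem _ _ (Nat.mod_lt _ (by omega))]

-- per-stop equality
theorem pv_stop_eq (colors : List (Int × Int × Int)) (k : Nat) (hk : k < colors.length) :
    pvStopA colors ((k : Int), colors[k]) = pvStopB colors ((k : Int)) := by
  have hne : colors ≠ [] := by intro h; rw [h] at hk; simp at hk
  have hrk : colors.rotate k ≠ [] := by
    intro h; have := List.Perm.length_eq (List.rotate_perm colors k); rw [h] at this; simp at this; omega
  simp only [pvStopA, pvStopB]
  rw [pv_values_eq colors k hk]
  -- first element of the rotation is colors[k]
  have hfirst : ((colors.rotate k).map pvRgbA).getD 0 "" = pvRgbA colors[k] := by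
    rw [List.rotate_eq_drop_append_take (Nat.le_of_lt hk)]
    rw [List.getD_eq_getElem _ _ (by simp; omega), List.getElem_map]
    congr 1
    rw [List.getElem_append_left (by simp [hk])]
    simp
  rw [hfirst]
  rw [pv_join_snoc _ _ (by simpa using hrk)]
  -- B's lookups
  have hlenmap : (colors.map pvRgbB).length = colors.length := by simp
  have hposgd : PySem.List.pyGetD
      ((colors.map pvRgbB).foldl (fun (st : List Int × Int) s =>
        (st.1 ++ [st.2], st.2 + PySem.Str.len s + 1)) (([] : List Int), (0 : Int))).1
      ((k : Int)) 0 = ((pvP (colors.map pvRgbB) k : Nat) : Int) := by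
    rw [pv_pos_foldl, List.nil_append, PySem.List.pyGetD_natCast]
    rw [List.getD_eq_getElem _ _ (by simp [hlenmap, hk])]
    simp
  have hrgbgd : PySem.List.pyGetD (colors.map pvRgbB) ((k : Int)) "" = pvRgbB colors[k] := by
    rw [PySem.List.pyGetD_natCast, List.getD_eq_getElem _ _ (by simp [hk]), List.getElem_map]
  rw [hposgd, hrgbgd]
  rw [pv_slice_rotate (colors.map pvRgbB) k (by simp [hk])]
  rw [← List.map_rotate, hlenmap, ← pv_rgb_eq]

theorem create_dynamic_gradient_py_eq (colors : List (Int × Int × Int)) (gradient_id : String) :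
    create_dynamic_gradient_py colors gradient_id = create_dynamic_gradient_py_alt colors gradient_id := by
  apply String.toList_inj.mp
  rw [pvA_unfold, pvB_unfold]
  rw [List.length_map, PySem.List.pyRange_zero_natCast]
  simp only [String.toList_append]
  rw [pv_foldl_toList, pv_foldl_toList]
  simp only [List.map_map, Function.comp_def]
  have hmaps : (PySem.List.enumerate colors 0).map (fun ic => (pvStopA colors ic).toList)
      = (List.range colors.length).map (fun (k : Nat) => (pvStopB colors ((k : Nat) : Int)).toList) := by
    apply List.ext_getElem (by simp)
    intro k h1 h2
    have hk : k < colors.length := by simpa using h2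
    simp only [List.getElem_map, List.getElem_range, PySem.List.getElem_enumerate]
    have hz : ((0 : Int) + (k : Nat), colors[k]'hk) = ((k : Int), colors[k]'hk) := by norm_num
    rw [hz, pv_stop_eq colors k hk]
  rw [hmaps]

-- ===== VERDICT (by name: the statement is the Claim_ definition above) =====
theorem create_dynamic_gradient_py_spec : Claim_equal_create_dynamic_gradient_py := by
  intro colors gradient_id _
  exact create_dynamic_gradient_py_eq colors gradient_id
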